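-- pv_equiv track=rewrite | github.com/wojin57/PS | Programmers/n+1_card_game.py | pair_check
-- ===== SOURCE A (Python) =====
-- def pair_check(hands, n):
--     for i, a in enumerate(hands):
--         for b in hands[i + 1:]:
--             if a + b == n + 1:
--                 hands.remove(a)
--                 hands.remove(b)
--                 return True
--     return False
-- ===== SOURCE B (Python) =====
-- def pair_check(hands, n):
--     # Return-value equivalent to A in one pass; does not mutate hands (A removes
--     # the found pair in place before returning True).
--     seen = set()
--     for b in hands:
--         if n + 1 - b in seen:
--             return True
--         seen.add(b)
--     return False
-- ===== Notes on version B (the rewrite author's own statement) =====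
-- stated objective: faster
-- what changed: Replaced the nested scan over all index pairs by a single pass that keeps a set of already-seen cards and tests whether the complement n+1-b was seen; equivalence is about the return value only (A also removes the found pair from hands in place, B does not mutate).
import Mathlib
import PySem

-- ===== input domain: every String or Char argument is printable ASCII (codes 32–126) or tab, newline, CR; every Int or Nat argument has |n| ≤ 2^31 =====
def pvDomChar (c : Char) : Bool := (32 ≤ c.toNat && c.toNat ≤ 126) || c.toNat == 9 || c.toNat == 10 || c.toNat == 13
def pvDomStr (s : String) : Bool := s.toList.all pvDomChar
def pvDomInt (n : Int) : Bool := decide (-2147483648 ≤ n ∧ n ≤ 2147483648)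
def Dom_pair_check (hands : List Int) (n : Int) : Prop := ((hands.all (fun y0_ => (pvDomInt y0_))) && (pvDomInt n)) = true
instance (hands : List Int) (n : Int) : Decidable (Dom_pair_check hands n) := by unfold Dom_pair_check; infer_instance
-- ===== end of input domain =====

-- B replaces A's quadratic nested pair scan by one pass with a set of seen cards,
-- checking whether the complement n+1-b was seen earlier (objective: faster).
-- NOTE: the equivalence proved is about the RETURN VALUE only: on success A also
-- removes the found pair from `hands` in place; B does not mutate its argument.

-- ===== PORT A =====
-- inner loop: for b in hands[i+1:]: if a + b == n + 1: return True
def pcA_inner (n a : Int) : List Int → Bool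
  | [] => false
  | b :: rest => if a + b == n + 1 then true else pcA_inner n a rest

-- outer loop: for i, a in enumerate(hands): … (the in-place removes happen only
-- immediately before `return True`, so they cannot affect the returned value)
def pcA_outer (hands : List Int) (n : Int) : List (Int × Int) → Bool
  | [] => false
  | (i, a) :: rest =>
      if pcA_inner n a (PySem.List.slice hands (some (i + 1)) none) then true
      else pcA_outer hands n rest

def pair_check (hands : List Int) (n : Int) : Bool :=
  pcA_outer hands n (PySem.List.enumerate hands 0)

-- ===== PORT B =====
-- for b in hands: if n + 1 - b in seen: return True;  seen.add(b)
def pcB_loop (n : Int) (seen : PySem.Set Int) : List Int → Bool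
  | [] => false
  | b :: rest =>
      if PySem.Set.contains seen (n + 1 - b) then true
      else pcB_loop n (PySem.Set.add seen b) rest

def pair_check_alt (hands : List Int) (n : Int) : Bool :=
  pcB_loop n PySem.Set.empty hands

-- ===== PRECONDITION & SPEC =====
def Spec_pair_check (hands : List Int) (n : Int) (out : Bool) : Prop := out = pair_check_alt hands n
instance (hands : List Int) (n : Int) (out : Bool) : Decidable (Spec_pair_check hands n out) := by unfold Spec_pair_check; infer_instance

-- ===== CLAIM (what is proved, stated in full; the proofs are below) =====
def Claim_equal_pair_check : Prop := ∀ (hands : List Int) (n : Int), Dom_pair_check hands n → Spec_pair_check hands n (pair_check hands n)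

-- ===== LEMMAS AND PROOFS =====

-- common characterisation: some earlier card a and later card b sum to n+1
def HasPair (hands : List Int) (t : Int) : Prop :=
  ∃ l1 a l2 b l3, hands = l1 ++ a :: l2 ++ b :: l3 ∧ a + b = t

theorem pcA_inner_iff (n a : Int) (l : List Int) :
    pcA_inner n a l = true ↔ ∃ b ∈ l, a + b = n + 1 := by
  induction l with
  | nil => simp [pcA_inner]
  | cons x rest ih =>
    simp only [pcA_inner]
    split
    · rename_i h
      simp only [beq_iff_eq] at h
      simp [h]
    · rename_i h
      simp only [beq_iff_eq] at h
      simp [ih, h]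

theorem pcA_outer_iff (hands : List Int) (n : Int) (L : List (Int × Int)) :
    pcA_outer hands n L = true ↔
      ∃ p ∈ L, ∃ b ∈ PySem.List.slice hands (some (p.1 + 1)) none, p.2 + b = n + 1 := by
  induction L with
  | nil => simp [pcA_outer]
  | cons p rest ih =>
    obtain ⟨i, a⟩ := p
    simp only [pcA_outer]
    split
    · rename_i h
      rw [pcA_inner_iff] at h
      simp only [List.mem_cons, true_iff]
      exact ⟨(i, a), Or.inl rfl, h⟩
    · rename_i h
      rw [pcA_inner_iff] at h
      push Not at h
      constructor
      · intro ht
        obtain ⟨q, hq, hb⟩ := ih.mp ht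
        exact ⟨q, List.mem_cons_of_mem _ hq, hb⟩
      · intro ⟨q, hq, b, hb, hsum⟩
        rcases List.mem_cons.mp hq with rfl | hq'
        · exact absurd hsum (h b hb)
        · exact ih.mpr ⟨q, hq', b, hb, hsum⟩

theorem pcB_iff (n : Int) (l : List Int) : ∀ (seen : PySem.Set Int),
    pcB_loop n seen l = true ↔
      ∃ l1 b l2, l = l1 ++ b :: l2 ∧ ((n + 1 - b) ∈ seen ∨ (n + 1 - b) ∈ l1) := by
  induction l with
  | nil => intro seen; simp [pcB_loop]
  | cons x rest ih =>
    intro seen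
    simp only [pcB_loop]
    split
    · rename_i h
      rw [PySem.Set.contains_iff] at h
      simp only [true_iff]
      exact ⟨[], x, rest, rfl, Or.inl h⟩
    · rename_i h
      rw [show (PySem.Set.contains seen (n + 1 - x) = true) = ((n+1-x) ∈ seen) from
        propext (PySem.Set.contains_iff _ _)] at h
      rw [ih]
      constructor
      · intro ⟨l1, b, l2, heq, hmem⟩
        refine ⟨x :: l1, b, l2, by rw [heq]; rfl, ?_⟩
        rcases hmem with hs | hl
        · rcases (PySem.Set.mem_add _ _ _).mp hs with hs' | rfl
          · exact Or.inl hs'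
          · exact Or.inr (List.mem_cons_self)
        · exact Or.inr (List.mem_cons_of_mem _ hl)
      · intro ⟨l1, b, l2, heq, hmem⟩
        cases l1 with
        | nil =>
          simp only [List.nil_append, List.cons.injEq] at heq
          obtain ⟨rfl, rfl⟩ := heq
          rcases hmem with hs | hl
          · exact absurd hs h
          · simp at hl
        | cons y l1' =>
          simp only [List.cons_append, List.cons.injEq] at heq
          obtain ⟨rfl, rfl⟩ := heq
          refine ⟨l1', b, l2, rfl, ?_⟩
          rcases hmem with hs | hl
          · exact Or.inl ((PySem.Set.mem_add _ _ _).mpr (Or.inl hs))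
          · rcases List.mem_cons.mp hl with hx | hl'
            · exact Or.inl ((PySem.Set.mem_add _ _ _).mpr (Or.inr hx))
            · exact Or.inr hl'

theorem pair_check_iff (hands : List Int) (n : Int) :
    pair_check hands n = true ↔ HasPair hands (n + 1) := by
  unfold pair_check
  rw [pcA_outer_iff]
  constructor
  · intro ⟨p, hp, b, hb, hsum⟩
    obtain ⟨k, hk, rfl⟩ := (PySem.List.mem_enumerate_iff _ _ _).mp hp
    simp only [zero_add] at *
    rw [show ((k : Int) + 1) = ((k + 1 : Nat) : Int) by push_cast; ring,
      PySem.List.slice_from_natCast] at hb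
    obtain ⟨l2, l3, hsplit⟩ := List.append_of_mem hb
    refine ⟨hands.take k, hands[k], l2, b, l3, ?_, hsum⟩
    have h1 : hands = hands.take k ++ hands[k] :: List.drop (k + 1) hands := by
      rw [List.getElem_cons_drop, List.take_append_drop]
    conv_lhs => rw [h1]
    rw [hsplit]
    simp
  · intro ⟨l1, a, l2, b, l3, heq, hsum⟩
    refine ⟨((l1.length : Int), a), ?_, b, ?_, hsum⟩
    · rw [PySem.List.mem_enumerate_iff]
      refine ⟨l1.length, by simp [heq], ?_⟩
      simp [heq, List.getElem_append_right]
    · rw [show ((l1.length : Int) + 1) = ((l1.length + 1 : Nat) : Int) by push_cast; ring,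
        PySem.List.slice_from_natCast, heq]
      have hre : l1 ++ a :: l2 ++ b :: l3 = (l1 ++ [a]) ++ (l2 ++ b :: l3) := by simp
      rw [show l1.length + 1 = (l1 ++ [a]).length by simp, hre, List.drop_left]
      simp

theorem pair_check_alt_iff (hands : List Int) (n : Int) :
    pair_check_alt hands n = true ↔ HasPair hands (n + 1) := by
  unfold pair_check_alt
  rw [pcB_iff]
  constructor
  · intro ⟨l1, b, l2, heq, hmem⟩
    rcases hmem with hs | hl
    · simp [PySem.Set.empty] at hs
    · obtain ⟨p, q, hsplit⟩ := List.append_of_mem hl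
      refine ⟨p, n + 1 - b, q, b, l2, ?_, by ring⟩
      rw [heq, hsplit]
  · intro ⟨l1, a, l2, b, l3, heq, hsum⟩
    refine ⟨l1 ++ a :: l2, b, l3, by simp [heq], Or.inr ?_⟩
    have : n + 1 - b = a := by omega
    rw [this]
    exact List.mem_append.mpr (Or.inr List.mem_cons_self)

-- ===== VERDICT (by name: the statement is the Claim_ definition above) =====
theorem pair_check_spec : Claim_equal_pair_check := by
  intro hands n _
  unfold Spec_pair_check
  have hA := pair_check_iff hands n
  have hB := pair_check_alt_iff hands n
  cases hA' : pair_check hands n <;> cases hB' : pair_check_alt hands n <;> simp_all
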